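-- pv_equiv track=rewrite | github.com/ZorranGit/CS1400 | cs1400-sneks-35/cs1400-sneks-35_03-lists_strings_hot_cold/lists_strings_hot_cold.py | add_hot_cold
-- ===== SOURCE A (Python) =====
-- def add_hot_cold(obvstr):
--     total=0
--     count=0
--     for i in obvstr:
--         if obvstr[count]=="H":
--             total+=1
--         else:
--             total-=1
--         count+=1
--     return total
-- ===== SOURCE B (Python) =====
-- def add_hot_cold(obvstr):
--     return 2 * obvstr.count("H") - len(obvstr)
-- ===== Notes on version B (the rewrite author's own statement) =====
-- stated objective: faster
-- what changed: Replaces the indexed per-character loop with a running plus/minus-one total by the closed form 2*count - len over aggregate counts computed by C-level built-ins.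
import Mathlib
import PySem

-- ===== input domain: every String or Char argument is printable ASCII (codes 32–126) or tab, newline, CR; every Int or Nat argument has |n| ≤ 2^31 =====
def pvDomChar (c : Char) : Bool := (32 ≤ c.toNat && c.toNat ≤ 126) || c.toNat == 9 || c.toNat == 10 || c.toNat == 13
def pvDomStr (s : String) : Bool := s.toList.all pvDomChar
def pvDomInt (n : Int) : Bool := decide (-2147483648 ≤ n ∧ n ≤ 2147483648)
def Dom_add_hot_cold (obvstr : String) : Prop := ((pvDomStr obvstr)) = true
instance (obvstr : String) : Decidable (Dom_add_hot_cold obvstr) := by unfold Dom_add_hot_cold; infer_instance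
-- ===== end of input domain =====

-- B replaces A's indexed per-character loop with the closed form 2*count - len over aggregate counts (measured faster).

-- ===== PORT A =====
-- A: total=0; count=0; for i in obvstr: if obvstr[count]=="H": total+=1 else: total-=1; count+=1; return total
def add_hot_cold (obvstr : String) : Int :=
  (obvstr.toList.foldl
    (fun (st : Int × Int) (_ : Char) =>
      ((if PySem.Str.pyGet? obvstr st.2 = some 'H' then st.1 + 1 else st.1 - 1), st.2 + 1))
    (0, 0)).1

-- ===== PORT B =====
-- B: return 2 * obvstr.count("H") - len(obvstr)
def add_hot_cold_alt (obvstr : String) : Int :=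
  2 * (PySem.Str.count obvstr "H" : Int) - (PySem.Str.len obvstr : Int)

-- ===== PRECONDITION & SPEC =====
def Spec_add_hot_cold (obvstr : String) (out : Int) : Prop := out = add_hot_cold_alt obvstr
instance (obvstr : String) (out : Int) : Decidable (Spec_add_hot_cold obvstr out) := by unfold Spec_add_hot_cold; infer_instance

-- ===== CLAIM (what is proved, stated in full; the proofs are below) =====
def Claim_equal_add_hot_cold : Prop := ∀ (obvstr : String), Dom_add_hot_cold obvstr → Spec_add_hot_cold obvstr (add_hot_cold obvstr)

-- ===== LEMMAS AND PROOFS =====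

-- Python's s.count(sub) for a single-character sub is the character count.
theorem count_go_singleton (c : Char) (l : List Char) (fuel acc : Nat) (h : l.length ≤ fuel) :
    PySem.Chars.count.go [c] fuel l acc = acc + l.count c := by
  induction l generalizing fuel acc with
  | nil => cases fuel <;> simp [PySem.Chars.count.go]
  | cons x t ih =>
    cases fuel with
    | zero => simp at h
    | succ f =>
      simp only [PySem.Chars.count.go]
      by_cases hx : x = c
      · subst hx
        simp [List.isPrefixOf, ih f (acc+1) (by simpa using h)]
        omega
      · simp [List.isPrefixOf, hx, Ne.symm hx, ih f acc (by simpa using h)]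

theorem chars_count_singleton (c : Char) (l : List Char) :
    PySem.Chars.count l [c] = l.count c := by
  simp [PySem.Chars.count, count_go_singleton c l l.length 0 le_rfl]

-- A's loop invariant: starting at index k with running total t.
theorem loopA (cs : List Char) (n : Nat) : ∀ (k : Nat) (t : Int), cs.length - k = n →
    ((cs.drop k).foldl (fun (st : Int × Int) (_ : Char) =>
       ((if PySem.List.pyGet? cs st.2 = some 'H' then st.1 + 1 else st.1 - 1), st.2 + 1)) (t, (k : Int))).1
    = t + 2 * ((cs.drop k).count 'H' : Int) - (cs.drop k).length := by
  induction n with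
  | zero =>
    intro k t h
    rw [List.drop_eq_nil_of_le (by omega)]
    simp
  | succ m ih =>
    intro k t _
    have hk : k < cs.length := by omega
    rw [List.drop_eq_getElem_cons hk]
    simp only [List.foldl_cons]
    have hget : PySem.List.pyGet? cs (k : Int) = some cs[k] := by simp [hk]
    rw [hget]
    have key := ih (k+1) (if some cs[k] = some 'H' then t + 1 else t - 1) (by omega)
    rw [show ((k:Int)+1) = ((k+1 : Nat) : Int) by push_cast; ring]
    rw [key, List.count_cons, List.length_cons]
    by_cases hc : cs[k] = 'H' <;> simp [hc] <;> omega

-- ===== VERDICT (by name: the statement is the Claim_ definition above) =====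
theorem add_hot_cold_spec : Claim_equal_add_hot_cold := by
  intro obvstr _
  unfold Spec_add_hot_cold add_hot_cold add_hot_cold_alt
  have h := loopA obvstr.toList obvstr.toList.length 0 0 (by omega)
  simp only [List.drop_zero, Nat.cast_zero] at h
  simp only [PySem.Str.pyGet?_eq, PySem.Chars.pyGet?_eq_listPyGet?]
  refine h.trans ?_
  have hc : PySem.Str.count obvstr "H" = obvstr.toList.count 'H' := by
    rw [PySem.Str.count_eq]; exact chars_count_singleton _ _
  rw [hc, PySem.Str.len_eq]
  ring
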